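-- pv_equiv track=rewrite | github.com/diljithmon170/LeetCode | max_toys.py | getMaxToys
-- ===== SOURCE A (Python) =====
-- def getMaxToys(n, arr, money):
--     L, H = 0, n - 1
--     while L <= H:
--         if sum(arr[L:H + 1]) <= money: break
--         else:
--             if arr[L] > arr[H]:
--                 L += 1
--             else:
--                 H -= 1
--     return H - L + 2
-- ===== SOURCE B (Python) =====
-- def getMaxToys(n, arr, money):
--     L, H = 0, n - 1
--     if L > H:
--         return H - L + 2
--     s = sum(arr[L:H + 1])
--     while L <= H and s > money:
--         if arr[L] > arr[H]:
--             s -= arr[L]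
--             L += 1
--         else:
--             s -= arr[H]
--             H -= 1
--     return H - L + 2
-- ===== Notes on version B (the rewrite author's own statement) =====
-- stated objective: alternative
-- what changed: B computes the window sum once and maintains it by subtracting the element removed at each step, instead of re-summing the slice arr[L:H+1] on every loop iteration.
import Mathlib
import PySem

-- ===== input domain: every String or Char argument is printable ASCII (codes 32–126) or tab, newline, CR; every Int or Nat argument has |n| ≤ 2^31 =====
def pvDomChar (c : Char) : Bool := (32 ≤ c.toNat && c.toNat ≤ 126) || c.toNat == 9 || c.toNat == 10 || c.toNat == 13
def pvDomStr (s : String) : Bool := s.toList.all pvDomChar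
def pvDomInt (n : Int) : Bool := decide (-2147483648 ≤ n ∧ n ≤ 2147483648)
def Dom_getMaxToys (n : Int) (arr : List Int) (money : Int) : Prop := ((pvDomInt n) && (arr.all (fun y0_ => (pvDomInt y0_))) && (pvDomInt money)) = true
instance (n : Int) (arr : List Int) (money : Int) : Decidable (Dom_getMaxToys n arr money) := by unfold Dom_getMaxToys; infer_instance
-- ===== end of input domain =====

-- B replaces A's per-iteration re-summing of arr[L:H+1] by a running sum updated with one
-- subtraction per step; same return value wherever A returns.

-- ===== PORT A =====
-- A's while loop: re-sum the slice each iteration; arr[L]/arr[H] ported with pyGetD (default 0);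
-- inside Pre_ those indices are in range exactly when Python's are, so the port is exact there.
-- Fuel makes the loop structural; each iteration shrinks H-L, so fuel (H-L+1).toNat never runs out
-- while L ≤ H (at fuel 0 the loop condition is already false and both branches return (L, H)).
def getMaxToysLoopA (arr : List Int) (money : Int) : Nat → Int → Int → Int × Int
  | 0, L, H => (L, H)
  | fuel + 1, L, H =>
    if L ≤ H then
      if (PySem.List.slice arr (some L) (some (H + 1))).sum ≤ money then (L, H)
      else if PySem.List.pyGetD arr L 0 > PySem.List.pyGetD arr H 0 then
        getMaxToysLoopA arr money fuel (L + 1) H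
      else
        getMaxToysLoopA arr money fuel L (H - 1)
    else (L, H)

def getMaxToys (n : Int) (arr : List Int) (money : Int) : Int :=
  let p := getMaxToysLoopA arr money ((n - 1) - 0 + 1).toNat 0 (n - 1)
  p.2 - p.1 + 2

-- ===== PORT B =====
-- B's while loop: carry the running sum s, subtract the removed element each step (same fuel scheme).
def getMaxToysLoopB (arr : List Int) (money : Int) : Nat → Int → Int → Int → Int × Int
  | 0, L, H, _ => (L, H)
  | fuel + 1, L, H, s =>
    if L ≤ H ∧ money < s then
      if PySem.List.pyGetD arr L 0 > PySem.List.pyGetD arr H 0 then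
        getMaxToysLoopB arr money fuel (L + 1) H (s - PySem.List.pyGetD arr L 0)
      else
        getMaxToysLoopB arr money fuel L (H - 1) (s - PySem.List.pyGetD arr H 0)
    else (L, H)

def getMaxToys_alt (n : Int) (arr : List Int) (money : Int) : Int :=
  let L : Int := 0
  let H : Int := n - 1
  if H < L then H - L + 2
  else
    let s := (PySem.List.slice arr (some L) (some (H + 1))).sum
    let p := getMaxToysLoopB arr money (H - L + 1).toNat L H s
    p.2 - p.1 + 2

-- ===== PRECONDITION & SPEC =====
-- Pre_ is exactly where the Python A returns: if n > len(arr) and the whole sum exceeds money,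
-- A's loop indexes arr[n-1] out of range and raises IndexError (B raises identically there).
def Pre_getMaxToys (n : Int) (arr : List Int) (money : Int) : Prop :=
  n ≤ (arr.length : Int) ∨ arr.sum ≤ money
instance (n : Int) (arr : List Int) (money : Int) : Decidable (Pre_getMaxToys n arr money) := by
  unfold Pre_getMaxToys; infer_instance

def pvWitness_getMaxToys : Int × List Int × Int := (4, ([1, 2, 3, 4] : List Int), 6)

def Spec_getMaxToys (n : Int) (arr : List Int) (money : Int) (out : Int) : Prop := out = getMaxToys_alt n arr money
instance (n : Int) (arr : List Int) (money : Int) (out : Int) : Decidable (Spec_getMaxToys n arr money out) := by unfold Spec_getMaxToys; infer_instance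

-- ===== CLAIM (what is proved, stated in full; the proofs are below) =====
def Claim_equal_getMaxToys : Prop := ∀ (n : Int) (arr : List Int) (money : Int), Dom_getMaxToys n arr money → Pre_getMaxToys n arr money → Spec_getMaxToys n arr money (getMaxToys n arr money)

-- ===== LEMMAS AND PROOFS =====

-- arr[L:H+1] = arr[L] :: arr[L+1:H+1]  (indices in range)
lemma pvSlice_cons (arr : List Int) (L H : Int) (h0 : 0 ≤ L) (hLH : L ≤ H)
    (hH : H < (arr.length : Int)) :
    PySem.List.slice arr (some L) (some (H + 1)) =
      PySem.List.pyGetD arr L 0 :: PySem.List.slice arr (some (L + 1)) (some (H + 1)) := by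
  rw [PySem.List.slice_toNat arr h0 (by omega), PySem.List.slice_toNat arr (by omega) (by omega)]
  have hlt : L.toNat < arr.length := by omega
  rw [PySem.List.pyGetD_eq_getElem arr 0 h0 (by omega : L < (arr.length : Int))]
  rw [List.drop_eq_getElem_cons hlt]
  have h1 : (H + 1).toNat - L.toNat = ((H + 1).toNat - (L + 1).toNat) + 1 := by omega
  have h2 : (L + 1).toNat = L.toNat + 1 := by omega
  rw [h1, h2, List.take_succ_cons]

-- arr[L:H+1] = arr[L:H] ++ [arr[H]]  (indices in range)
lemma pvSlice_snoc (arr : List Int) (L H : Int) (h0 : 0 ≤ L) (hLH : L ≤ H)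
    (hH : H < (arr.length : Int)) :
    PySem.List.slice arr (some L) (some (H + 1)) =
      PySem.List.slice arr (some L) (some H) ++ [PySem.List.pyGetD arr H 0] := by
  rw [PySem.List.slice_toNat arr h0 (by omega), PySem.List.slice_toNat arr h0 (by omega)]
  have h1 : (H + 1).toNat - L.toNat = (H.toNat - L.toNat) + 1 := by omega
  rw [h1, List.take_add_one]
  congr 1
  have hidx : (arr.drop L.toNat)[H.toNat - L.toNat]? = some arr[H.toNat] := by
    rw [List.getElem?_drop]
    have : L.toNat + (H.toNat - L.toNat) = H.toNat := by omega
    rw [this, List.getElem?_eq_getElem (by omega)]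
  rw [hidx, PySem.List.pyGetD_eq_getElem arr 0 (by omega : (0:Int) ≤ H) hH]
  rfl

-- the two loops agree from any state A's loop reaches without raising, for equal fuel
lemma pvLoops_agree (arr : List Int) (money : Int) :
    ∀ (fuel : Nat) (L H : Int), 0 ≤ L →
      (H < (arr.length : Int) ∨ (PySem.List.slice arr (some L) (some (H + 1))).sum ≤ money) →
      getMaxToysLoopB arr money fuel L H ((PySem.List.slice arr (some L) (some (H + 1))).sum) =
        getMaxToysLoopA arr money fuel L H := by
  intro fuel
  induction fuel with
  | zero => intro L H _ _; rfl
  | succ k ih =>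
    intro L H h0 hside
    rw [getMaxToysLoopA, getMaxToysLoopB]
    by_cases hLH : L ≤ H
    · by_cases hs : (PySem.List.slice arr (some L) (some (H + 1))).sum ≤ money
      · simp [hLH, hs, not_lt.mpr hs]
      · have hH : H < (arr.length : Int) := by
          rcases hside with h | h
          · exact h
          · exact absurd h hs
        have hmoney : money < (PySem.List.slice arr (some L) (some (H + 1))).sum := by omega
        simp only [hLH, hs, hmoney, and_self, if_true, if_false]
        by_cases hc : PySem.List.pyGetD arr L 0 > PySem.List.pyGetD arr H 0
        · simp only [hc, if_true]
          have hsum : (PySem.List.slice arr (some L) (some (H + 1))).sum - PySem.List.pyGetD arr L 0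
              = (PySem.List.slice arr (some (L + 1)) (some (H + 1))).sum := by
            rw [pvSlice_cons arr L H h0 hLH hH]; simp
          rw [hsum]
          exact ih (L + 1) H (by omega) (Or.inl hH)
        · simp only [hc, if_false]
          have hsum : (PySem.List.slice arr (some L) (some (H + 1))).sum - PySem.List.pyGetD arr H 0
              = (PySem.List.slice arr (some L) (some ((H - 1) + 1))).sum := by
            have : H - 1 + 1 = H := by omega
            rw [this, pvSlice_snoc arr L H h0 hLH hH]; simp
          rw [hsum]
          exact ih L (H - 1) h0 (Or.inl (by omega))
    · simp [hLH]

-- ===== VERDICT (by name: the statement is the Claim_ definition above) =====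
theorem getMaxToys_spec : Claim_equal_getMaxToys := by
  unfold Claim_equal_getMaxToys
  intro n arr money _ hpre
  unfold Spec_getMaxToys getMaxToys getMaxToys_alt
  by_cases hn : n - 1 < 0
  · have hf : ((n - 1) - 0 + 1).toNat = 0 := by omega
    rw [hf]
    simp [hn, getMaxToysLoopA]
  · simp only [hn, if_false]
    have hside : (n - 1 : Int) < (arr.length : Int) ∨
        (PySem.List.slice arr (some 0) (some ((n - 1) + 1))).sum ≤ money := by
      by_cases hlen : n ≤ (arr.length : Int)
      · exact Or.inl (by omega)
      · right
        have h : arr.sum ≤ money := hpre.resolve_left hlen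
        have h01 : n - 1 + 1 = n := by omega
        rw [h01]
        have hsl : PySem.List.slice arr (some (0 : Int)) (some n) = arr := by
          rw [PySem.List.slice_toNat arr le_rfl (by omega)]
          show List.take n.toNat arr = arr
          exact List.take_of_length_le (by omega)
        rw [hsl]; exact h
    rw [pvLoops_agree arr money ((n - 1) - 0 + 1).toNat 0 (n - 1) le_rfl hside]
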